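-- pv_equiv track=rewrite | github.com/lorossi/development-hell | Python/advent-of-code-2021/11/11.py | step
-- ===== SOURCE A (Python) =====
-- def check_flash(grid, w, h):
--     flash = []
--     for x in range(1, 1 + w):
--         for y in range(1, 1 + h):
--             if grid[y][x] >= 10:
--                 flash.append([x, y])
--
--     return flash
--
-- def increase_grid(grid, w, h):
--     for x in range(1, 1 + w):
--         for y in range(1, 1 + h):
--             grid[y][x] += 1
--
-- def make_flash(grid, coords):
--     grid[coords[1]][coords[0]] = 0
--
--     for dx in range(-1, 2):
--         for dy in range(-1, 2):
--             if dx == 0 and dy == 0: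
--                 continue
--
--             grid[coords[1] + dy][coords[0] + dx] += 1
--
-- def step(grid):
--     w = len(grid[0]) - 2
--     h = len(grid) - 2
--
--     increase_grid(grid, w, h)
--
--     flashes = []
--     flashing = True
--     while flashing:
--         new_flashes = check_flash(grid, w, h)
--         flashing = len(new_flashes) > 0
--
--         for f in new_flashes:
--             if f not in flashes:
--                 make_flash(grid, f)
--                 flashes.append(f)
--
--     for f in flashes:
--         grid[f[1]][f[0]] = 0
--
--     return len(flashes)
-- ===== SOURCE B (Python) =====
-- def step(grid):
--     # Return-value equivalent to A; does NOT mutate grid (A resets flashed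
--     # cells in place; equivalence is about the return value only).
--     w = len(grid[0]) - 2
--     h = len(grid) - 2
--
--     def lit(flashed, x, y):
--         near = sum(1 for dx in (-1, 0, 1) for dy in (-1, 0, 1)
--                    if (dx, dy) != (0, 0) and (x + dx, y + dy) in flashed)
--         return grid[y][x] + 1 + near >= 10
--
--     flashed = set()
--     stack = [(x, y) for y in range(1, h + 1) for x in range(1, w + 1)
--              if lit(flashed, x, y)]
--     flashed.update(stack)
--     while stack:
--         x, y = stack.pop()
--         for dx in (-1, 0, 1):
--             for dy in (-1, 0, 1):
--                 nx, ny = x + dx, y + dy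
--                 if (dx, dy) != (0, 0) and 1 <= nx <= w and 1 <= ny <= h \
--                         and (nx, ny) not in flashed and lit(flashed, nx, ny):
--                     flashed.add((nx, ny))
--                     stack.append((nx, ny))
--     return len(flashed)
-- ===== Notes on version B (the rewrite author's own statement) =====
-- stated objective: faster
-- what changed: A repeatedly rescans the whole grid for cells >= 10 while mutating it and does a linear 'f not in flashes' test per candidate; B never mutates: it computes each cell's flash condition from the original grid plus a set of flashed cells, seeds a stack with the initially-lit cells and flood-fills, re-examining only the 8 neighbours of each popped cell, with O(1) set membership.
-- outside the precondition, e.g. on step([[0, 0, 0], [0, 0, 0], [0, 0, 0], [0, 0]]): A returns 0, B returns 0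
import Mathlib
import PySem

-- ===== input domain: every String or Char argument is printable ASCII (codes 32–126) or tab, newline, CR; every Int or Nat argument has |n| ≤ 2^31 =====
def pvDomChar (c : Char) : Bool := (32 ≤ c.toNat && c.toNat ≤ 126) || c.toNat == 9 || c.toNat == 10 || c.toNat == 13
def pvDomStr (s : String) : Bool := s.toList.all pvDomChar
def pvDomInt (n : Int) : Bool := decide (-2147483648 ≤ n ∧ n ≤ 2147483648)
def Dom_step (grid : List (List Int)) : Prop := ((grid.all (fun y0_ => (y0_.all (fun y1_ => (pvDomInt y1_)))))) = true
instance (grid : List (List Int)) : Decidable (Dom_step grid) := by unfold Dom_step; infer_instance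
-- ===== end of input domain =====

-- ===== PORT A =====
-- A mutates its argument in place (increments, resets flashed cells); the equivalence proved
-- here is about the RETURN value only. Indexing helpers are exact for the non-negative
-- in-range accesses A makes under Pre_step (Python raises IndexError otherwise).
def pvRowA (grid : List (List Int)) (y : Int) : List Int := (PySem.List.pyGet? grid y).getD []

def pvValA (grid : List (List Int)) (y x : Int) : Int := (PySem.List.pyGet? (pvRowA grid y) x).getD 0

-- grid[y][x] = f(grid[y][x])
def pvUpdA (grid : List (List Int)) (y x : Int) (f : Int → Int) : List (List Int) :=
  grid.modify y.toNat (fun row => row.modify x.toNat f)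

def check_flash (grid : List (List Int)) (w h : Int) : List (Int × Int) :=
  (PySem.List.pyRange 1 (1 + w) 1).foldl (fun flash x =>
    (PySem.List.pyRange 1 (1 + h) 1).foldl (fun flash y =>
      if pvValA grid y x ≥ 10 then flash ++ [(x, y)] else flash) flash) []

def increase_grid (grid : List (List Int)) (w h : Int) : List (List Int) :=
  (PySem.List.pyRange 1 (1 + w) 1).foldl (fun g x =>
    (PySem.List.pyRange 1 (1 + h) 1).foldl (fun g y => pvUpdA g y x (· + 1)) g) grid

def make_flash (grid : List (List Int)) (coords : Int × Int) : List (List Int) :=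
  let g := pvUpdA grid coords.2 coords.1 (fun _ => 0)
  (PySem.List.pyRange (-1) 2 1).foldl (fun g dx =>
    (PySem.List.pyRange (-1) 2 1).foldl (fun g dy =>
      if dx = 0 ∧ dy = 0 then g else pvUpdA g (coords.2 + dy) (coords.1 + dx) (· + 1)) g) g

-- the 'while flashing' loop; fuel w*h+1 is an upper bound on the number of iterations
-- (proved below: every iteration but the last appends at least one new interior flash)
def pvLoopA (w h : Int) : Nat → List (List Int) → List (Int × Int) → List (List Int) × List (Int × Int)
  | 0, grid, flashes => (grid, flashes)
  | fuel + 1, grid, flashes =>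
    let nf := check_flash grid w h
    let s := nf.foldl (fun (s : List (List Int) × List (Int × Int)) f =>
      if f ∈ s.2 then s else (make_flash s.1 f, s.2 ++ [f])) (grid, flashes)
    if nf.length > 0 then pvLoopA w h fuel s.1 s.2 else s

def step (grid : List (List Int)) : Int :=
  let w := (((PySem.List.pyGet? grid 0).getD []).length : Int) - 2
  let h := (grid.length : Int) - 2
  let r := pvLoopA w h (w.toNat * h.toNat + 1) (increase_grid grid w h) []
  -- Python's final 'for f in flashes' loop only resets cells of the (discarded) grid:
  let _final := r.2.foldl (fun g f => pvUpdA g f.2 f.1 (fun _ => 0)) r.1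
  (r.2.length : Int)

-- ===== PORT B =====
-- B never mutates: it reads the original grid and floods from a stack of flashing cells.
def pvDirs : List (Int × Int) :=
  ([-1, 0, 1] : List Int).flatMap (fun dx => ([-1, 0, 1] : List Int).map (fun dy => (dx, dy)))

def pvGetB (grid : List (List Int)) (y x : Int) : Int :=
  (PySem.List.pyGet? ((PySem.List.pyGet? grid y).getD []) x).getD 0

-- sum(1 for dx … for dy … if (dx,dy)!=(0,0) and (x+dx,y+dy) in flashed): a 0/1-sum is a count
def pvNear (flashed : List (Int × Int)) (x y : Int) : Int :=
  (pvDirs.countP (fun d => d != ((0 : Int), (0 : Int)) && flashed.contains (x + d.1, y + d.2)) : Int)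

def pvLit (grid : List (List Int)) (flashed : List (Int × Int)) (x y : Int) : Bool :=
  pvGetB grid y x + 1 + pvNear flashed x y ≥ 10

def pvLoopB (grid : List (List Int)) (w h : Int) :
    Nat → List (Int × Int) → PySem.Set (Int × Int) → PySem.Set (Int × Int)
  | 0, _, flashed => flashed
  | fuel + 1, stack, flashed =>
    match PySem.List.pop? stack with       -- stack.pop(): the last element
    | none => flashed                      -- stack exhausted: the while loop ends
    | some ((x, y), rest) =>
      let s := ([-1, 0, 1] : List Int).foldl (fun s dx =>
        ([-1, 0, 1] : List Int).foldl (fun (s : List (Int × Int) × PySem.Set (Int × Int)) dy =>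
          let nx := x + dx
          let ny := y + dy
          if (!(dx == 0 && dy == 0)) && decide (1 ≤ nx) && decide (nx ≤ w) && decide (1 ≤ ny)
              && decide (ny ≤ h) && !(PySem.Set.contains s.2 (nx, ny)) && pvLit grid s.2 nx ny
          then (s.1 ++ [(nx, ny)], PySem.Set.add s.2 (nx, ny)) else s) s) (rest, flashed)
      pvLoopB grid w h fuel s.1 s.2

def step_alt (grid : List (List Int)) : Int :=
  let w := (((PySem.List.pyGet? grid 0).getD []).length : Int) - 2
  let h := (grid.length : Int) - 2
  let stack := (PySem.List.pyRange 1 (h + 1) 1).flatMap (fun y =>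
    ((PySem.List.pyRange 1 (w + 1) 1).filter (fun x => pvLit grid [] x y)).map (fun x => (x, y)))
  let flashed := PySem.Set.ofList stack    -- flashed.update(stack) on the empty set
  ((pvLoopB grid w h (3 * (w.toNat * h.toNat) + 1) stack flashed).length : Int)

-- ===== PRECONDITION & SPEC =====
-- Pre_step excludes the empty grid (A raises IndexError on grid[0]) and grids that have an
-- interior (first row and column count both > 2) together with a row shorter than the first
-- row: on those A raises IndexError whenever an access reaches a short row, and returns only
-- accidentally when no access does.
def Pre_step (grid : List (List Int)) : Prop :=
  grid ≠ [] ∧ ((grid.headD []).length ≤ 2 ∨ grid.length ≤ 2 ∨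
    ∀ row ∈ grid, (grid.headD []).length ≤ row.length)

instance (grid : List (List Int)) : Decidable (Pre_step grid) := by unfold Pre_step; infer_instance

def pvWitness_step : List (List Int) :=
  [[0, 0, 0, 0], [0, 9, 9, 0], [0, 9, 1, 0], [0, 0, 0, 0]]

def Spec_step (grid : List (List Int)) (out : Int) : Prop := out = step_alt grid
instance (grid : List (List Int)) (out : Int) : Decidable (Spec_step grid out) := by
  unfold Spec_step; infer_instance

-- ===== CLAIM (what is proved, stated in full; the proofs are below) =====
def Claim_equal_step : Prop :=
  ∀ (grid : List (List Int)), Dom_step grid → Pre_step grid → Spec_step grid (step grid)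


-- ===== LEMMAS AND PROOFS =====

-- `pvInterior w h c` : c is an interior cell (the only cells that can flash)
def pvInterior (w h : Int) (c : Int × Int) : Prop := 1 ≤ c.1 ∧ c.1 ≤ w ∧ 1 ≤ c.2 ∧ c.2 ≤ h

-- the flash predicate both programs test: original value + 1 + flashed neighbours ≥ 10
def pvP (g0 : List (List Int)) (fl : List (Int × Int)) (c : Int × Int) : Prop :=
  10 ≤ pvGetB g0 c.2 c.1 + 1 + pvNear fl c.1 c.2

-- S absorbs every cell the predicate lights up
def pvClosed (g0 : List (List Int)) (w h : Int) (S : List (Int × Int)) : Prop :=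
  ∀ c, pvInterior w h c → pvP g0 S c → c ∈ S

-- dimensions as A/B compute them, relative to the original grid (Pre_step supplies them)
def pvDims (g0 : List (List Int)) (w h : Int) : Prop :=
  (∀ row ∈ g0, w + 2 ≤ (row.length : Int)) ∧ (g0.length : Int) = h + 2

theorem pvValA_eq_pvGetB (g : List (List Int)) (y x : Int) : pvValA g y x = pvGetB g y x := rfl

-- ---- 2D access/update lemmas ----
theorem pvUpdA_shape (g : List (List Int)) (y x : Int) (f : Int → Int) :
    (pvUpdA g y x f).map List.length = g.map List.length := by
  apply List.ext_getElem?
  intro j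
  simp [pvUpdA, List.getElem?_modify]
  cases h : g[j]? <;> simp
  split <;> simp [List.length_modify]

theorem length_of_shape {g g' : List (List Int)}
    (hs : g.map List.length = g'.map List.length) : g.length = g'.length := by
  have := congrArg List.length hs; simpa using this

theorem pvRowA_length_of_shape {g g' : List (List Int)}
    (hs : g.map List.length = g'.map List.length) {y : Int} (hy : 0 ≤ y) :
    (pvRowA g y).length = (pvRowA g' y).length := by
  unfold pvRowA
  rw [PySem.List.pyGet?_of_nonneg _ hy, PySem.List.pyGet?_of_nonneg _ hy]
  have h1 := congrArg (fun l => l[y.toNat]?) hs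
  simp only [List.getElem?_map] at h1
  cases h : g[y.toNat]? <;> cases h' : g'[y.toNat]? <;> simp [h, h'] at h1 ⊢ <;> simp [h1]

theorem pvValA_pvUpdA_ne {g : List (List Int)} {y x y' x' : Int} (f : Int → Int)
    (hy : 0 ≤ y) (hx : 0 ≤ x) (hy' : 0 ≤ y') (hx' : 0 ≤ x') (hne : ¬(y = y' ∧ x = x')) :
    pvValA (pvUpdA g y x f) y' x' = pvValA g y' x' := by
  unfold pvValA pvRowA pvUpdA
  rw [PySem.List.pyGet?_of_nonneg _ hy', PySem.List.pyGet?_of_nonneg _ hy']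
  by_cases hyy : y = y'
  · subst hyy
    have hxx : ¬ (x.toNat = x'.toNat) := by
      intro hc; exact hne ⟨rfl, by omega⟩
    simp only [List.getElem?_modify]
    cases h : g[y.toNat]? <;> simp
    rw [PySem.List.pyGet?_of_nonneg _ hx', PySem.List.pyGet?_of_nonneg _ hx']
    simp [List.getElem?_modify, hxx]
  · have : ¬ (y.toNat = y'.toNat) := by omega
    simp [this]

theorem pvValA_pvUpdA_self {g : List (List Int)} {y x : Int} (f : Int → Int)
    (hy : 0 ≤ y) (hx : 0 ≤ x) (hyr : y.toNat < g.length) (hxr : x.toNat < (pvRowA g y).length) :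
    pvValA (pvUpdA g y x f) y x = f (pvValA g y x) := by
  unfold pvValA pvRowA pvUpdA
  rw [PySem.List.pyGet?_of_nonneg _ hy, PySem.List.pyGet?_of_nonneg _ hy]
  simp only [List.getElem?_modify]
  have hrow : g[y.toNat]? = some (g[y.toNat]'hyr) := List.getElem?_eq_getElem hyr
  simp [hrow]
  rw [PySem.List.pyGet?_of_nonneg _ hx, PySem.List.pyGet?_of_nonneg _ hx]
  have hxr' : x.toNat < (g[y.toNat]'hyr).length := by
    unfold pvRowA at hxr
    rw [PySem.List.pyGet?_of_nonneg _ hy] at hxr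
    simpa [hrow] using hxr
  have hcell : (g[y.toNat]'hyr)[x.toNat]? = some ((g[y.toNat]'hyr)[x.toNat]'hxr') :=
    List.getElem?_eq_getElem hxr'
  simp [hcell]

theorem pvValA_pvUpdA_add {g : List (List Int)} {y x y' x' : Int}
    (hy : 0 ≤ y) (hx : 0 ≤ x) (hy' : 0 ≤ y') (hx' : 0 ≤ x')
    (hin : y = y' ∧ x = x' → y.toNat < g.length ∧ x.toNat < (pvRowA g y).length) :
    pvValA (pvUpdA g y x (· + 1)) y' x' = pvValA g y' x' + if y = y' ∧ x = x' then 1 else 0 := by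
  by_cases hcase : y = y' ∧ x = x'
  · obtain ⟨rfl, rfl⟩ := hcase
    obtain ⟨h1, h2⟩ := hin ⟨rfl, rfl⟩
    rw [pvValA_pvUpdA_self _ hy hx h1 h2]
    simp
  · rw [pvValA_pvUpdA_ne _ hy hx hy' hx' hcase]
    simp [hcase]

-- ---- pvNear lemmas ----
theorem pvDirs_lit :
    pvDirs = [(-1,-1),(-1,0),(-1,1),(0,-1),(0,0),(0,1),(1,-1),(1,0),(1,1)] := by decide

theorem pvNear_nil (x y : Int) : pvNear [] x y = 0 := by
  simp [pvNear, pvDirs]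

theorem pvNear_mono {F F' : List (Int × Int)} (h : ∀ a ∈ F, a ∈ F') (x y : Int) :
    pvNear F x y ≤ pvNear F' x y := by
  unfold pvNear
  have := List.countP_mono_left (l := pvDirs)
    (p := fun d => d != ((0 : Int), (0 : Int)) && F.contains (x + d.1, y + d.2))
    (q := fun d => d != ((0 : Int), (0 : Int)) && F'.contains (x + d.1, y + d.2))
    (by intro a _ ha
        simp only [Bool.and_eq_true, List.contains_iff_mem] at ha ⊢
        exact ⟨ha.1, h _ ha.2⟩)
  exact_mod_cast this

theorem pvNear_congr {F F' : List (Int × Int)} (h : ∀ a, a ∈ F ↔ a ∈ F') (x y : Int) :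
    pvNear F x y = pvNear F' x y :=
  le_antisymm (pvNear_mono (fun a ha => (h a).1 ha) x y)
    (pvNear_mono (fun a ha => (h a).2 ha) x y)

theorem pvNear_le_eight (F : List (Int × Int)) (x y : Int) : pvNear F x y ≤ 8 := by
  unfold pvNear
  have := List.countP_mono_left (l := pvDirs)
    (p := fun d => d != ((0 : Int), (0 : Int)) && F.contains (x + d.1, y + d.2))
    (q := fun d => d != ((0 : Int), (0 : Int)))
    (by intro a _ ha; simp only [Bool.and_eq_true] at ha; exact ha.1)
  have h8 : pvDirs.countP (fun d => d != ((0 : Int), (0 : Int))) = 8 := by decide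
  omega

theorem pvNear_singleton (c : Int × Int) (x y : Int) :
    pvNear [c] x y =
      if c ≠ (x, y) ∧ c.1 - x ≤ 1 ∧ x - c.1 ≤ 1 ∧ c.2 - y ≤ 1 ∧ y - c.2 ≤ 1 then 1 else 0 := by
  obtain ⟨cx, cy⟩ := c
  simp only [pvNear, pvDirs_lit, List.countP_cons, List.countP_nil, List.contains_cons,
    List.contains_nil, Bool.or_false, Bool.and_eq_true, bne_iff_ne, ne_eq, Prod.mk.injEq,
    not_and, beq_iff_eq, Prod.ext_iff, decide_eq_true_eq]
  norm_num
  split_ifs <;> omega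

theorem countP_or_disjoint {α : Type} (l : List α) (p q : α → Bool)
    (h : ∀ a ∈ l, ¬(p a = true ∧ q a = true)) :
    l.countP (fun a => p a || q a) = l.countP p + l.countP q := by
  induction l with
  | nil => simp
  | cons a l ih =>
    simp only [List.countP_cons]
    rw [ih (fun b hb => h b (List.mem_cons_of_mem _ hb))]
    have := h a (List.mem_cons_self)
    cases hp : p a <;> cases hq : q a <;> simp_all <;> omega

theorem pvNear_append_singleton {F : List (Int × Int)} {c : Int × Int} (hc : c ∉ F) (x y : Int) :
    pvNear (F ++ [c]) x y = pvNear F x y + pvNear [c] x y := by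
  unfold pvNear
  rw [show (fun d : Int × Int =>
        d != ((0 : Int), (0 : Int)) && (F ++ [c]).contains (x + d.1, y + d.2))
      = (fun d : Int × Int => (d != ((0 : Int), (0 : Int)) && F.contains (x + d.1, y + d.2))
          || (d != ((0 : Int), (0 : Int)) && [c].contains (x + d.1, y + d.2))) by
    funext d
    simp [List.contains_append, Bool.and_or_distrib_left]]
  rw [countP_or_disjoint]
  · push_cast; ring
  · rintro a - ⟨h1, h2⟩
    simp only [Bool.and_eq_true, List.contains_iff_mem, List.contains_cons] at h1 h2
    rcases h2 with ⟨-, h2⟩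
    simp only [List.contains_nil, Bool.or_false, beq_iff_eq] at h2
    exact hc (h2 ▸ h1.2)

theorem pvLit_iff (g0 : List (List Int)) (F : List (Int × Int)) (x y : Int) :
    pvLit g0 F x y = true ↔ pvP g0 F (x, y) := by
  simp [pvLit, pvP]

-- ---- the generated scan lists ----
theorem nodup_flatMap_pairs {α β γ : Type} (xs : List α) (f : α → List β) (mk : α → β → γ)
    (hinj : ∀ a b a' b', mk a b = mk a' b' → a = a' ∧ b = b')
    (hxs : xs.Nodup) (hf : ∀ x, (f x).Nodup) :
    (xs.flatMap fun x => (f x).map (mk x)).Nodup := by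
  induction xs with
  | nil => simp
  | cons a xs ih =>
    simp only [List.flatMap_cons, List.nodup_append]
    refine ⟨(hf a).map (fun b b' hb => (hinj _ _ _ _ hb).2), ih (List.Nodup.of_cons hxs), ?_⟩
    intro p hp q hq heq
    obtain ⟨b, _, rfl⟩ := List.mem_map.mp hp
    obtain ⟨x, hx, hb2⟩ := List.mem_flatMap.mp hq
    obtain ⟨b', _, hb'⟩ := List.mem_map.mp hb2
    have := hinj a b x b' (by rw [heq, ← hb'])
    exact (List.nodup_cons.mp hxs).1 (this.1 ▸ hx)

def pvCells (w h : Int) : List (Int × Int) :=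
  (PySem.List.pyRange 1 (w + 1) 1).flatMap fun x =>
    (PySem.List.pyRange 1 (h + 1) 1).map fun y => (x, y)

theorem mem_pvCells {w h : Int} {c : Int × Int} : c ∈ pvCells w h ↔ pvInterior w h c := by
  obtain ⟨cx, cy⟩ := c
  simp only [pvCells, List.mem_flatMap, List.mem_map, PySem.List.mem_pyRange_one, pvInterior,
    Prod.mk.injEq]
  constructor
  · rintro ⟨x, hx, y, hy, rfl, rfl⟩; exact ⟨by omega, by omega, by omega, by omega⟩
  · rintro ⟨h1, h2, h3, h4⟩; exact ⟨cx, by omega, cy, by omega, rfl, rfl⟩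

theorem nodup_pvCells (w h : Int) : (pvCells w h).Nodup := by
  refine nodup_flatMap_pairs _ _ _ (fun a b a' b' hp => ?_) (PySem.List.nodup_pyRange_one _ _)
    (fun _ => PySem.List.nodup_pyRange_one _ _)
  exact ⟨(Prod.ext_iff.mp hp).1, (Prod.ext_iff.mp hp).2⟩

theorem length_pvCells (w h : Int) : (pvCells w h).length = w.toNat * h.toNat := by
  simp [pvCells, List.length_flatMap, PySem.List.length_pyRange_one]

theorem length_le_cells {w h : Int} {l : List (Int × Int)} (hn : l.Nodup)
    (hi : ∀ c ∈ l, pvInterior w h c) : l.length ≤ w.toNat * h.toNat := by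
  have := (hn.subperm (fun c hc => mem_pvCells.mpr (hi c hc))).length_le
  rwa [length_pvCells] at this

theorem check_flash_eq (g : List (List Int)) (w h : Int) :
    check_flash g w h = (pvCells w h).filter fun c => decide (pvValA g c.2 c.1 ≥ 10) := by
  unfold check_flash pvCells
  have hin : ∀ (x : Int) (acc : List (Int × Int)),
      (PySem.List.pyRange 1 (1 + h) 1).foldl (fun flash y =>
        if pvValA g y x ≥ 10 then flash ++ [(x, y)] else flash) acc
      = acc ++ ((PySem.List.pyRange 1 (1 + h) 1).filter fun y => decide (pvValA g y x ≥ 10)).map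
          fun y => (x, y) := by
    intro x acc
    rw [show (fun (flash : List (Int × Int)) y =>
        if pvValA g y x ≥ 10 then flash ++ [(x, y)] else flash)
      = (fun flash y => if (fun y => decide (pvValA g y x ≥ 10)) y = true
          then flash ++ [(fun y => (x, y)) y] else flash) by
      funext fl y; simp]
    exact PySem.List.foldl_append_if _ _ _ _
  simp only [hin]
  rw [PySem.List.foldl_append_eq_flatMap, List.filter_flatMap]
  rw [show (1 + w) = w + 1 by ring, show (1 + h) = h + 1 by ring]
  simp [List.filter_map, Function.comp_def]

-- ---- in-range bookkeeping ----
theorem pvDims_inrange {g0 : List (List Int)} {w h : Int} (hd : pvDims g0 w h)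
    {y x : Int} (hy : 0 ≤ y) (hy2 : y ≤ h + 1) (hx : 0 ≤ x) (hx2 : x ≤ w + 1) :
    y.toNat < g0.length ∧ x.toNat < (pvRowA g0 y).length := by
  obtain ⟨hrow, hlen⟩ := hd
  have hylt : y.toNat < g0.length := by omega
  refine ⟨hylt, ?_⟩
  have hmem : pvRowA g0 y ∈ g0 := by
    unfold pvRowA
    rw [PySem.List.pyGet?_of_nonneg _ hy, List.getElem?_eq_getElem hylt]
    exact List.getElem_mem _
  have := hrow _ hmem
  omega

theorem pvValA_cast_shape {g g0 : List (List Int)} {w h : Int} (hd : pvDims g0 w h)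
    (hs : g.map List.length = g0.map List.length)
    {y x : Int} (hy : 0 ≤ y) (hy2 : y ≤ h + 1) (hx : 0 ≤ x) (hx2 : x ≤ w + 1) :
    y.toNat < g.length ∧ x.toNat < (pvRowA g y).length := by
  obtain ⟨h1, h2⟩ := pvDims_inrange hd hy hy2 hx hx2
  rw [length_of_shape hs, pvRowA_length_of_shape hs hy]
  exact ⟨h1, h2⟩

-- ---- increase_grid ----
theorem foldl_shape {α : Type} (l : List α) (F : List (List Int) → α → List (List Int))
    (hF : ∀ g a, (F g a).map List.length = g.map List.length) :
    ∀ g, (l.foldl F g).map List.length = g.map List.length := by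
  induction l with
  | nil => intro g; rfl
  | cons a l ih => intro g; rw [List.foldl_cons, ih, hF]

theorem increase_shape (g : List (List Int)) (w h : Int) :
    (increase_grid g w h).map List.length = g.map List.length := by
  unfold increase_grid
  exact foldl_shape _ _ (fun g x => foldl_shape _ _ (fun g y => pvUpdA_shape g y x _) g) g

theorem make_flash_shape (g : List (List Int)) (c : Int × Int) :
    (make_flash g c).map List.length = g.map List.length := by
  unfold make_flash
  rw [foldl_shape _ _ (fun g dx => foldl_shape _ _ (fun g dy => by
    split
    · rfl
    · exact pvUpdA_shape _ _ _ _) g)]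
  exact pvUpdA_shape _ _ _ _

theorem foldl_col_val {g0 : List (List Int)} {w h : Int} (hd : pvDims g0 w h)
    {x y' x' : Int} (hx : 0 ≤ x) (hx2 : x ≤ w + 1) (hy' : 0 ≤ y') (hx' : 0 ≤ x') :
    ∀ (ys : List Int), ys.Nodup → (∀ y ∈ ys, 0 ≤ y ∧ y ≤ h + 1) →
    ∀ g, g.map List.length = g0.map List.length →
    pvValA (ys.foldl (fun g y => pvUpdA g y x (· + 1)) g) y' x'
      = pvValA g y' x' + if y' ∈ ys ∧ x = x' then 1 else 0 := by
  intro ys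
  induction ys with
  | nil => intro _ _ g _; simp
  | cons y ys ih =>
    intro hnd hb g hs
    have hy0 := (hb y (List.mem_cons_self)).1
    have hy1 := (hb y (List.mem_cons_self)).2
    rw [List.foldl_cons,
      ih hnd.of_cons (fun a ha => hb a (List.mem_cons_of_mem _ ha)) _
        ((pvUpdA_shape _ _ _ _).trans hs),
      pvValA_pvUpdA_add hy0 hx hy' hx'
        (fun _ => pvValA_cast_shape hd hs hy0 hy1 hx hx2)]
    have hynotin : y ∉ ys := (List.nodup_cons.mp hnd).1
    by_cases h1 : y = y' <;> by_cases h2 : x = x' <;> by_cases h3 : y' ∈ ys <;>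
      simp_all <;> omega

theorem increase_val {g : List (List Int)} {w h : Int} (hd : pvDims g w h) {c : Int × Int}
    (hc : pvInterior w h c) :
    pvValA (increase_grid g w h) c.2 c.1 = pvValA g c.2 c.1 + 1 := by
  obtain ⟨hc1, hc2, hc3, hc4⟩ := hc
  unfold increase_grid
  have key : ∀ (xs : List Int), xs.Nodup → (∀ a ∈ xs, 0 ≤ a ∧ a ≤ w + 1) →
      ∀ g', g'.map List.length = g.map List.length →
      pvValA (xs.foldl (fun gg x => (PySem.List.pyRange 1 (1 + h) 1).foldl
          (fun gg y => pvUpdA gg y x (· + 1)) gg) g') c.2 c.1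
        = pvValA g' c.2 c.1 + if c.1 ∈ xs then 1 else 0 := by
    intro xs
    induction xs with
    | nil => intro _ _ g' _; simp
    | cons a xs ih =>
      intro hnd hb g' hs
      rw [List.foldl_cons,
        ih hnd.of_cons (fun b hb' => hb b (List.mem_cons_of_mem _ hb')) _
          ((foldl_shape _ _ (fun g y => pvUpdA_shape g y a _) _).trans hs),
        foldl_col_val hd (hb a List.mem_cons_self).1 (hb a List.mem_cons_self).2
          (by omega) (by omega) _ (PySem.List.nodup_pyRange_one _ _)
          (fun y hy => by rw [PySem.List.mem_pyRange_one] at hy; omega) _ hs]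
      have h2 : c.2 ∈ PySem.List.pyRange 1 (1 + h) 1 := by
        rw [PySem.List.mem_pyRange_one]; omega
      have : a ∉ xs := (List.nodup_cons.mp hnd).1
      by_cases h1 : a = c.1 <;> by_cases h3 : c.1 ∈ xs <;> simp_all <;> omega
  rw [key _ (PySem.List.nodup_pyRange_one _ _)
      (fun a ha => by rw [PySem.List.mem_pyRange_one] at ha; omega) g rfl]
  have : c.1 ∈ PySem.List.pyRange 1 (1 + w) 1 := by
    rw [PySem.List.mem_pyRange_one]; omega
  simp [this]

theorem foldl_nested (F : List (List Int) → (Int × Int) → List (List Int)) (xs ys : List Int) :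
    ∀ g, xs.foldl (fun g dx => ys.foldl (fun g dy => F g (dx, dy)) g) g
      = (xs.flatMap fun dx => ys.map fun dy => (dx, dy)).foldl F g := by
  induction xs with
  | nil => intro g; rfl
  | cons a xs ih =>
    intro g
    rw [List.foldl_cons, List.flatMap_cons, List.foldl_append, List.foldl_map, ih]

theorem offRange_lit : PySem.List.pyRange (-1) 2 1 = ([-1, 0, 1] : List Int) := by decide

theorem foldl_offs_val {g0 : List (List Int)} {w h : Int} (hd : pvDims g0 w h)
    {c d : Int × Int} (hc : pvInterior w h c) (hdy : 0 ≤ d.2) (hdx : 0 ≤ d.1) :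
    ∀ offs : List (Int × Int), (∀ o ∈ offs, -1 ≤ o.1 ∧ o.1 ≤ 1 ∧ -1 ≤ o.2 ∧ o.2 ≤ 1) →
    ∀ g, g.map List.length = g0.map List.length →
    pvValA (offs.foldl (fun g o =>
        if o.1 = 0 ∧ o.2 = 0 then g else pvUpdA g (c.2 + o.2) (c.1 + o.1) (· + 1)) g) d.2 d.1
      = pvValA g d.2 d.1
        + (offs.countP (fun o =>
            decide (¬(o.1 = 0 ∧ o.2 = 0) ∧ c.2 + o.2 = d.2 ∧ c.1 + o.1 = d.1)) : Int) := by
  obtain ⟨hc1, hc2, hc3, hc4⟩ := hc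
  intro offs
  induction offs with
  | nil => intro _ g _; simp
  | cons o rest ih =>
    intro hb g hs
    have hob := hb o List.mem_cons_self
    have hbr := fun a ha => hb a (List.mem_cons_of_mem _ ha)
    rw [List.foldl_cons]
    by_cases h0 : o.1 = 0 ∧ o.2 = 0
    · rw [if_pos h0, ih hbr g hs, List.countP_cons]
      simp [h0]
    · rw [if_neg h0, ih hbr _ ((pvUpdA_shape _ _ _ _).trans hs),
        pvValA_pvUpdA_add (by omega) (by omega) hdy hdx
          (fun _ => pvValA_cast_shape hd hs (by omega) (by omega) (by omega) (by omega))]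
      rw [List.countP_cons]
      by_cases hhit : c.2 + o.2 = d.2 ∧ c.1 + o.1 = d.1 <;> simp [hhit, h0] <;> push_cast <;> omega

theorem countP_dirs_hit (c d : Int × Int) :
    ((pvDirs.countP fun o =>
        decide (¬(o.1 = 0 ∧ o.2 = 0) ∧ c.2 + o.2 = d.2 ∧ c.1 + o.1 = d.1)) : Int)
      = pvNear [c] d.1 d.2 := by
  rw [pvNear_singleton]
  obtain ⟨cx, cy⟩ := c
  obtain ⟨dx, dy⟩ := d
  simp only [pvDirs_lit, List.countP_cons, List.countP_nil, ne_eq, Prod.mk.injEq, not_and,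
    decide_eq_true_eq, Prod.ext_iff]
  norm_num
  split_ifs <;> omega

theorem make_flash_fold (g : List (List Int)) (c : Int × Int) :
    make_flash g c = pvDirs.foldl (fun g o =>
        if o.1 = 0 ∧ o.2 = 0 then g else pvUpdA g (c.2 + o.2) (c.1 + o.1) (· + 1))
      (pvUpdA g c.2 c.1 (fun _ => 0)) := by
  unfold make_flash
  rw [offRange_lit]
  exact foldl_nested
    (fun g o => if o.1 = 0 ∧ o.2 = 0 then g else pvUpdA g (c.2 + o.2) (c.1 + o.1) (· + 1))
    _ _ _

theorem pvDirs_bounds : ∀ o ∈ pvDirs, -1 ≤ o.1 ∧ o.1 ≤ 1 ∧ -1 ≤ o.2 ∧ o.2 ≤ 1 := by decide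

theorem make_flash_val_ne {g0 g : List (List Int)} {w h : Int} (hd : pvDims g0 w h)
    (hs : g.map List.length = g0.map List.length) {c d : Int × Int}
    (hc : pvInterior w h c) (hdy : 0 ≤ d.2) (hdx : 0 ≤ d.1) (hne : d ≠ c) :
    pvValA (make_flash g c) d.2 d.1 = pvValA g d.2 d.1 + pvNear [c] d.1 d.2 := by
  obtain ⟨hc1, hc2, hc3, hc4⟩ := id hc
  rw [make_flash_fold,
    foldl_offs_val hd hc hdy hdx pvDirs pvDirs_bounds _ ((pvUpdA_shape _ _ _ _).trans hs),
    countP_dirs_hit,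
    pvValA_pvUpdA_ne _ (by omega : (0:Int) ≤ c.2) (by omega : (0:Int) ≤ c.1) hdy hdx
      (by intro hcon; exact hne (Prod.ext_iff.mpr ⟨hcon.2.symm, hcon.1.symm⟩))]

theorem make_flash_val_self {g0 g : List (List Int)} {w h : Int} (hd : pvDims g0 w h)
    (hs : g.map List.length = g0.map List.length) {c : Int × Int} (hc : pvInterior w h c) :
    pvValA (make_flash g c) c.2 c.1 = 0 := by
  have hc' := hc
  obtain ⟨hc1, hc2, hc3, hc4⟩ := hc'
  rw [make_flash_fold,
    foldl_offs_val (d := c) hd hc (by omega) (by omega) pvDirs pvDirs_bounds _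
      ((pvUpdA_shape _ _ _ _).trans hs),
    countP_dirs_hit,
    pvValA_pvUpdA_self _ (by omega) (by omega)
      (pvValA_cast_shape (y := c.2) (x := c.1) hd hs (by omega) (by omega) (by omega)
        (by omega)).1
      (pvValA_cast_shape (y := c.2) (x := c.1) hd hs (by omega) (by omega) (by omega)
        (by omega)).2,
    pvNear_singleton]
  simp

-- ---- invariant of A's mutable loop ----
def pvInv3 (g : List (List Int)) : List (Int × Int) → Prop
  | [] => True
  | c :: rest => pvValA g c.2 c.1 = pvNear rest c.1 c.2 ∧ pvInv3 g rest

def pvInvA (g0 : List (List Int)) (w h : Int) (g : List (List Int)) (fl : List (Int × Int)) : Prop :=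
  g.map List.length = g0.map List.length ∧
  fl.Nodup ∧ (∀ c ∈ fl, pvInterior w h c) ∧
  (∀ c, pvInterior w h c → c ∉ fl →
    pvValA g c.2 c.1 = pvGetB g0 c.2 c.1 + 1 + pvNear fl c.1 c.2) ∧
  pvInv3 g fl

theorem pvInv3_le_eight {g : List (List Int)} {fl : List (Int × Int)} (h3 : pvInv3 g fl)
    {c : Int × Int} (hc : c ∈ fl) : pvValA g c.2 c.1 ≤ 8 := by
  induction fl with
  | nil => cases hc
  | cons a rest ih =>
    rcases List.mem_cons.mp hc with rfl | hc'
    · exact h3.1 ▸ pvNear_le_eight _ _ _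
    · exact ih h3.2 hc'

theorem pvInv3_append {g0 g : List (List Int)} {w h : Int} (hd : pvDims g0 w h)
    (hs : g.map List.length = g0.map List.length) {c : Int × Int}
    (hc : pvInterior w h c) :
    ∀ fl : List (Int × Int), c ∉ fl → (∀ e ∈ fl, pvInterior w h e) →
    pvInv3 g fl → pvInv3 (make_flash g c) (fl ++ [c]) := by
  intro fl
  induction fl with
  | nil =>
    intro _ _ _
    exact ⟨by rw [make_flash_val_self hd hs hc, pvNear_nil], trivial⟩
  | cons e rest ih =>
    intro hcf hfl h3
    have hce : e ≠ c := fun hx => hcf (hx ▸ List.mem_cons_self)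
    have hei := hfl e List.mem_cons_self
    have hcr : c ∉ rest := fun hx => hcf (List.mem_cons_of_mem _ hx)
    refine ⟨?_, ih hcr (fun a ha => hfl a (List.mem_cons_of_mem _ ha)) h3.2⟩
    rw [make_flash_val_ne hd hs hc (by have := hei.2.2.1; omega) (by have := hei.1; omega) hce,
      h3.1]
    exact (pvNear_append_singleton hcr _ _).symm

theorem make_flash_invA {g0 : List (List Int)} {w h : Int} (hd : pvDims g0 w h)
    {g : List (List Int)} {fl : List (Int × Int)} {c : Int × Int}
    (hI : pvInvA g0 w h g fl) (hc : pvInterior w h c) (hcf : c ∉ fl) :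
    pvInvA g0 w h (make_flash g c) (fl ++ [c]) := by
  obtain ⟨hs, hnd, hint, hval, h3⟩ := hI
  refine ⟨(make_flash_shape _ _).trans hs, ?_, ?_, ?_, pvInv3_append hd hs hc fl hcf hint h3⟩
  · exact hnd.append (List.nodup_singleton c) (fun a ha hb => by
      simp only [List.mem_singleton] at hb; exact hcf (hb ▸ ha))
  · intro a ha
    rcases List.mem_append.mp ha with ha | ha
    · exact hint a ha
    · simp only [List.mem_singleton] at ha; exact ha ▸ hc
  · intro d hdi hdf
    have hdfl : d ∉ fl := fun hx => hdf (List.mem_append_left _ hx)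
    have hdc : d ≠ c := fun hx => hdf (hx ▸ List.mem_append_right _ List.mem_cons_self)
    rw [make_flash_val_ne hd hs hc (by have := hdi.2.2.1; omega) (by have := hdi.1; omega) hdc,
      hval d hdi hdfl, pvNear_append_singleton hcf]
    ring

theorem round_fold {g0 : List (List Int)} {w h : Int} (hd : pvDims g0 w h)
    {S flR : List (Int × Int)} (hS : pvClosed g0 w h S) :
    ∀ (nf : List (Int × Int)) (g : List (List Int)) (fl : List (Int × Int)),
    pvInvA g0 w h g fl → nf.Nodup →
    (∀ f ∈ nf, pvInterior w h f ∧ (f ∉ flR → pvP g0 flR f)) →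
    (∀ f ∈ flR, f ∈ fl) → (∀ f ∈ fl, f ∈ S) →
    (nf.foldl (fun (s : List (List Int) × List (Int × Int)) f =>
        if f ∈ s.2 then s else (make_flash s.1 f, s.2 ++ [f])) (g, fl)).2
      = fl ++ nf.filter (fun f => decide (f ∉ fl)) ∧
    pvInvA g0 w h
      (nf.foldl (fun (s : List (List Int) × List (Int × Int)) f =>
        if f ∈ s.2 then s else (make_flash s.1 f, s.2 ++ [f])) (g, fl)).1
      (nf.foldl (fun (s : List (List Int) × List (Int × Int)) f =>
        if f ∈ s.2 then s else (make_flash s.1 f, s.2 ++ [f])) (g, fl)).2 ∧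
    (∀ f ∈ (nf.foldl (fun (s : List (List Int) × List (Int × Int)) f =>
        if f ∈ s.2 then s else (make_flash s.1 f, s.2 ++ [f])) (g, fl)).2, f ∈ S) := by
  intro nf
  induction nf with
  | nil => intro g fl hI _ _ _ hfS; exact ⟨by simp, hI, hfS⟩
  | cons f rest ih =>
    intro g fl hI hnd hnf hflR hfS
    simp only [List.foldl_cons]
    by_cases hf : f ∈ fl
    · rw [if_pos hf]
      obtain ⟨e1, e2, e3⟩ := ih g fl hI hnd.of_cons
        (fun a ha => hnf a (List.mem_cons_of_mem _ ha)) hflR hfS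
      refine ⟨?_, e2, e3⟩
      rw [e1, List.filter_cons_of_neg (by simpa using hf)]
    · rw [if_neg hf]
      have hfi := (hnf f List.mem_cons_self).1
      have hfS' : f ∈ S := by
        apply hS f hfi
        have hP := (hnf f List.mem_cons_self).2 (fun hx => hf (hflR f hx))
        unfold pvP at hP ⊢
        have := pvNear_mono (F := flR) (F' := S) (fun a ha => hfS a (hflR a ha)) f.1 f.2
        omega
      obtain ⟨e1, e2, e3⟩ := ih (make_flash g f) (fl ++ [f])
        (make_flash_invA hd hI hfi hf) hnd.of_cons
        (fun a ha => hnf a (List.mem_cons_of_mem _ ha))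
        (fun a ha => List.mem_append_left _ (hflR a ha))
        (fun a ha => by
          rcases List.mem_append.mp ha with ha | ha
          · exact hfS a ha
          · simp only [List.mem_singleton] at ha; exact ha ▸ hfS')
      refine ⟨?_, e2, e3⟩
      rw [e1, List.filter_cons_of_pos (by simpa using hf), List.append_assoc,
        List.singleton_append]
      have hfilt : List.filter (fun a => decide (a ∉ fl ++ [f])) rest
          = List.filter (fun a => decide (a ∉ fl)) rest := by
        apply List.filter_congr
        intro a ha
        have haf : a ≠ f := fun hx => (List.nodup_cons.mp hnd).1 (hx ▸ ha)
        simp [List.mem_append, haf]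
      rw [hfilt]

-- master lemma for A's while loop
theorem loopA_master {g0 : List (List Int)} {w h : Int} (hd : pvDims g0 w h)
    {S : List (Int × Int)} (hS : pvClosed g0 w h S) :
    ∀ (fuel : Nat) (g : List (List Int)) (fl : List (Int × Int)),
    pvInvA g0 w h g fl → (∀ f ∈ fl, f ∈ S) →
    w.toNat * h.toNat + 1 ≤ fuel + fl.length →
    (pvLoopA w h fuel g fl).2.Nodup ∧
    (∀ c ∈ (pvLoopA w h fuel g fl).2, pvInterior w h c) ∧
    (∀ c ∈ (pvLoopA w h fuel g fl).2, c ∈ S) ∧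
    (∀ c, pvInterior w h c → c ∉ (pvLoopA w h fuel g fl).2 →
      ¬ pvP g0 (pvLoopA w h fuel g fl).2 c) ∧
    (∀ c ∈ fl, c ∈ (pvLoopA w h fuel g fl).2) := by
  intro fuel
  induction fuel with
  | zero =>
    intro g fl hI _ hfuel
    exfalso
    have := length_le_cells hI.2.1 hI.2.2.1
    omega
  | succ fuel ih =>
    intro g fl hI hfS hfuel
    have hmem : ∀ a : Int × Int, a ∈ check_flash g w h ↔ pvInterior w h a ∧ 10 ≤ pvValA g a.2 a.1 := by
      intro a
      rw [check_flash_eq, List.mem_filter]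
      simp [mem_pvCells]
    have hndnf : (check_flash g w h).Nodup := by
      rw [check_flash_eq]; exact (nodup_pvCells w h).filter _
    have hprop : ∀ f ∈ check_flash g w h,
        pvInterior w h f ∧ (f ∉ fl → pvP g0 fl f) := by
      intro f hf
      obtain ⟨hfi, hfv⟩ := (hmem f).mp hf
      refine ⟨hfi, fun hfl => ?_⟩
      unfold pvP
      rw [← hI.2.2.2.1 f hfi hfl]
      exact hfv
    obtain ⟨e1, e2, e3⟩ := round_fold (flR := fl) hd hS (check_flash g w h) g fl hI hndnf
      hprop (fun _ hx => hx) hfS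
    simp only [pvLoopA]
    by_cases hpos : (check_flash g w h).length > 0
    · rw [if_pos hpos]
      have hgrow : 1 ≤ ((check_flash g w h).filter (fun f => decide (f ∉ fl))).length := by
        rcases List.exists_mem_of_length_pos hpos with ⟨f, hf⟩
        have hffl : f ∉ fl := by
          intro hffl
          have := pvInv3_le_eight hI.2.2.2.2 hffl
          have := ((hmem f).mp hf).2
          omega
        have : f ∈ (check_flash g w h).filter (fun f => decide (f ∉ fl)) :=
          List.mem_filter.mpr ⟨hf, by simpa using hffl⟩
        exact List.length_pos_of_mem this
      obtain ⟨c1, c2, c3, c4, c5⟩ := ih _ _ e2 e3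
        (by rw [e1, List.length_append]; omega)
      exact ⟨c1, c2, c3, c4, fun c hc =>
        c5 c (by rw [e1]; exact List.mem_append_left _ hc)⟩
    · rw [if_neg hpos]
      have hnf0 : check_flash g w h = [] := by
        simpa using List.length_eq_zero_iff.mp (by omega)
      rw [hnf0]
      simp only [List.foldl_nil]
      refine ⟨hI.2.1, hI.2.2.1, hfS, ?_, fun c hc => hc⟩
      intro c hci hcf hP
      have hcin : c ∈ check_flash g w h := by
        rw [hmem c]
        refine ⟨hci, ?_⟩
        rw [hI.2.2.2.1 c hci hcf]
        exact hP
      rw [hnf0] at hcin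
      cases hcin

-- ---- B's loop ----
theorem foldl_pres {σ α : Type} (Q : σ → Prop) (f : σ → α → σ)
    (hf : ∀ s a, Q s → Q (f s a)) : ∀ (l : List α) (s : σ), Q s → Q (l.foldl f s) := by
  intro l
  induction l with
  | nil => intro s hs; exact hs
  | cons a l ih => intro s hs; exact ih _ (hf s a hs)

theorem foldl_nested' {σ : Type} (F : σ → (Int × Int) → σ) (xs ys : List Int) :
    ∀ s, xs.foldl (fun s dx => ys.foldl (fun s dy => F s (dx, dy)) s) s
      = (xs.flatMap fun dx => ys.map fun dy => (dx, dy)).foldl F s := by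
  induction xs with
  | nil => intro s; rfl
  | cons a xs ih =>
    intro s
    rw [List.foldl_cons, List.flatMap_cons, List.foldl_append, List.foldl_map, ih]

-- the body of B's neighbour scan, as a function of the offset pair
def pvBStep (grid : List (List Int)) (w h x y : Int)
    (s : List (Int × Int) × PySem.Set (Int × Int)) (o : Int × Int) :
    List (Int × Int) × PySem.Set (Int × Int) :=
  if (!(o.1 == 0 && o.2 == 0)) && decide (1 ≤ x + o.1) && decide (x + o.1 ≤ w)
      && decide (1 ≤ y + o.2) && decide (y + o.2 ≤ h)
      && !(PySem.Set.contains s.2 (x + o.1, y + o.2)) && pvLit grid s.2 (x + o.1) (y + o.2)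
  then (s.1 ++ [(x + o.1, y + o.2)], PySem.Set.add s.2 (x + o.1, y + o.2)) else s

theorem pvLoopB_succ (grid : List (List Int)) (w h : Int) (fuel : Nat)
    (rest : List (Int × Int)) (x y : Int) (F : PySem.Set (Int × Int)) :
    pvLoopB grid w h (fuel + 1) (rest ++ [(x, y)]) F
      = pvLoopB grid w h fuel (pvDirs.foldl (pvBStep grid w h x y) (rest, F)).1
          (pvDirs.foldl (pvBStep grid w h x y) (rest, F)).2 := by
  simp only [pvLoopB, PySem.List.pop?_last]
  exact congrArg (fun s : List (Int × Int) × PySem.Set (Int × Int) =>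
    pvLoopB grid w h fuel s.1 s.2) (foldl_nested' (pvBStep grid w h x y) _ _ (rest, F))

theorem mem_pvDirs {o : Int × Int} :
    o ∈ pvDirs ↔ -1 ≤ o.1 ∧ o.1 ≤ 1 ∧ -1 ≤ o.2 ∧ o.2 ≤ 1 := by
  obtain ⟨a, b⟩ := o
  rw [pvDirs_lit]
  simp [Prod.ext_iff]
  constructor
  · rintro (⟨rfl, rfl⟩ | ⟨rfl, rfl⟩ | ⟨rfl, rfl⟩ | ⟨rfl, rfl⟩ | ⟨rfl, rfl⟩ | ⟨rfl, rfl⟩ |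
      ⟨rfl, rfl⟩ | ⟨rfl, rfl⟩ | ⟨rfl, rfl⟩) <;> omega
  · intro hb
    have ha1 : a = -1 ∨ a = 0 ∨ a = 1 := by omega
    have hb1 : b = -1 ∨ b = 0 ∨ b = 1 := by omega
    rcases ha1 with rfl | rfl | rfl <;> rcases hb1 with rfl | rfl | rfl <;> simp

theorem loopB_subset {g0 : List (List Int)} {w h : Int}
    {S : List (Int × Int)} (hS : pvClosed g0 w h S) :
    ∀ (fuel : Nat) (st : List (Int × Int)) (F : PySem.Set (Int × Int)),
    (∀ c ∈ F, c ∈ S) →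
    (∀ c ∈ pvLoopB g0 w h fuel st F, c ∈ S) := by
  intro fuel
  induction fuel with
  | zero => intro st F hF; exact hF
  | succ fuel ih =>
    intro st F hF
    rcases List.eq_nil_or_concat st with rfl | ⟨rest, ⟨x, y⟩, rfl⟩
    · simpa [pvLoopB, PySem.List.pop?] using hF
    · rw [List.concat_eq_append, pvLoopB_succ]
      apply ih
      have := foldl_pres (fun s : List (Int × Int) × PySem.Set (Int × Int) => ∀ c ∈ s.2, c ∈ S)
        (pvBStep g0 w h x y) ?_ pvDirs (rest, F) hF
      · exact this
      · intro s o hs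
        unfold pvBStep
        split
        · next hcond =>
          simp only [Bool.and_eq_true, Bool.not_eq_eq_eq_not, Bool.not_true, decide_eq_true_eq,
            Bool.not_eq_true'] at hcond
          intro e he
          rcases (PySem.Set.mem_add _ _ _).mp he with he | rfl
          · exact hs e he
          · apply hS _ ⟨hcond.1.1.1.1.1.2, hcond.1.1.1.1.2, hcond.1.1.1.2, hcond.1.1.2⟩
            have hP := (pvLit_iff g0 s.2 (x + o.1) (y + o.2)).mp hcond.2
            unfold pvP at hP ⊢
            dsimp only at hP ⊢
            have := pvNear_mono (F := (s.2 : List (Int × Int))) (F' := S) hs (x + o.1) (y + o.2)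
            omega
        · exact hs

def pvInvB (g0 : List (List Int)) (w h : Int) (st : List (Int × Int))
    (F : PySem.Set (Int × Int)) : Prop :=
  F.Nodup ∧ st.Nodup ∧ (∀ c ∈ F, pvInterior w h c) ∧ (∀ c ∈ st, c ∈ F) ∧
  (∀ c, pvInterior w h c → c ∉ F → ¬ pvP g0 (F.filter fun a => decide (a ∉ st)) c)

theorem innerB {g0 : List (List Int)} {w h x y : Int} {pr : List (Int × Int)} :
    ∀ (offs : List (Int × Int)) (s : List (Int × Int) × PySem.Set (Int × Int)),
    s.2.Nodup → s.1.Nodup → (∀ e ∈ s.1, e ∈ s.2) → (∀ e ∈ s.2, pvInterior w h e) →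
    (x, y) ∈ s.2 → (x, y) ∉ s.1 →
    (∀ a, (a ∈ s.2 ∧ a ∉ s.1) ↔ (a ∈ pr ∨ a = (x, y))) →
    (∀ d, pvInterior w h d → d ∉ s.2 →
      (¬ pvP g0 (pr ++ [(x, y)]) d ∨
        ∃ o ∈ offs, ¬(o.1 = 0 ∧ o.2 = 0) ∧ d = (x + o.1, y + o.2))) →
    (offs.foldl (pvBStep g0 w h x y) s).2.Nodup ∧
    (offs.foldl (pvBStep g0 w h x y) s).1.Nodup ∧
    (∀ e ∈ (offs.foldl (pvBStep g0 w h x y) s).1, e ∈ (offs.foldl (pvBStep g0 w h x y) s).2) ∧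
    (∀ e ∈ (offs.foldl (pvBStep g0 w h x y) s).2, pvInterior w h e) ∧
    (x, y) ∈ (offs.foldl (pvBStep g0 w h x y) s).2 ∧
    (x, y) ∉ (offs.foldl (pvBStep g0 w h x y) s).1 ∧
    (∀ a, (a ∈ (offs.foldl (pvBStep g0 w h x y) s).2 ∧
        a ∉ (offs.foldl (pvBStep g0 w h x y) s).1) ↔ (a ∈ pr ∨ a = (x, y))) ∧
    (∀ d, pvInterior w h d → d ∉ (offs.foldl (pvBStep g0 w h x y) s).2 →
      ¬ pvP g0 (pr ++ [(x, y)]) d) ∧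
    (offs.foldl (pvBStep g0 w h x y) s).1.length + s.2.length
      = s.1.length + (offs.foldl (pvBStep g0 w h x y) s).2.length ∧
    (∀ e ∈ s.2, e ∈ (offs.foldl (pvBStep g0 w h x y) s).2) := by
  intro offs
  induction offs with
  | nil =>
    intro s h1 h2 h3 h4 h5 h6 h7 h8
    refine ⟨h1, h2, h3, h4, h5, h6, h7, ?_, rfl, fun e he => he⟩
    intro d hdi hdF
    rcases h8 d hdi hdF with hL | ⟨o, ho, _⟩
    · exact hL
    · cases ho
  | cons o rest ih =>
    intro s h1 h2 h3 h4 h5 h6 h7 h8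
    have hpr : ∀ a ∈ pr, a ∈ s.2 := fun a ha => ((h7 a).mpr (Or.inl ha)).1
    rw [List.foldl_cons]
    by_cases hcond : ((!(o.1 == 0 && o.2 == 0)) && decide (1 ≤ x + o.1) && decide (x + o.1 ≤ w)
        && decide (1 ≤ y + o.2) && decide (y + o.2 ≤ h)
        && !(PySem.Set.contains s.2 (x + o.1, y + o.2))
        && pvLit g0 s.2 (x + o.1) (y + o.2)) = true
    · have hstep : pvBStep g0 w h x y s o
          = (s.1 ++ [(x + o.1, y + o.2)], PySem.Set.add s.2 (x + o.1, y + o.2)) := by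
        unfold pvBStep
        rw [if_pos hcond]
      simp only [Bool.and_eq_true] at hcond
      obtain ⟨⟨⟨⟨⟨⟨hz, hb1⟩, hb2⟩, hb3⟩, hb4⟩, hnm⟩, hlit⟩ := hcond
      rw [decide_eq_true_eq] at hb1 hb2 hb3 hb4
      have hnmem : (x + o.1, y + o.2) ∉ (s.2 : List (Int × Int)) := by
        intro hmm
        rw [(PySem.Set.contains_iff _ _).mpr hmm] at hnm
        exact absurd hnm (by simp)
      have hadd : PySem.Set.add s.2 (x + o.1, y + o.2)
          = (s.2 : List (Int × Int)) ++ [(x + o.1, y + o.2)] :=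
        PySem.Set.add_of_not_mem hnmem
      have hxyne : (x, y) ≠ (x + o.1, y + o.2) := fun hh => hnmem (hh ▸ h5)
      rw [hstep]
      obtain ⟨c1, c2, c3, c4, c5, c6, c7, c8, c9, c10⟩ := ih
        ((s.1 ++ [(x + o.1, y + o.2)], PySem.Set.add s.2 (x + o.1, y + o.2)))
        (by dsimp only; rw [hadd]
            exact h1.append (List.nodup_singleton _)
              (fun a ha hb => by simp only [List.mem_singleton] at hb; exact hnmem (hb ▸ ha)))
        (by dsimp only
            exact h2.append (List.nodup_singleton _)
              (fun a ha hb => by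
                simp only [List.mem_singleton] at hb
                exact hnmem (hb ▸ h3 a ha)))
        (by dsimp only
            intro e he
            rcases List.mem_append.mp he with he | he
            · exact (PySem.Set.mem_add _ _ _).mpr (Or.inl (h3 e he))
            · simp only [List.mem_singleton] at he
              exact (PySem.Set.mem_add _ _ _).mpr (Or.inr he))
        (by dsimp only
            intro e he
            rcases (PySem.Set.mem_add _ _ _).mp he with he | rfl
            · exact h4 e he
            · exact ⟨hb1, hb2, hb3, hb4⟩)
        (by dsimp only; exact (PySem.Set.mem_add _ _ _).mpr (Or.inl h5))
        (by dsimp only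
            intro hmm
            rcases List.mem_append.mp hmm with hmm | hmm
            · exact h6 hmm
            · simp only [List.mem_singleton] at hmm
              exact hxyne hmm)
        (by dsimp only
            intro a
            rw [List.mem_append, List.mem_singleton]
            constructor
            · rintro ⟨haF, han⟩
              rcases (PySem.Set.mem_add _ _ _).mp haF with haF | rfl
              · exact (h7 a).mp ⟨haF, fun hx => han (Or.inl hx)⟩
              · exact absurd (Or.inr rfl) han
            · intro hh
              have := (h7 a).mpr hh
              refine ⟨(PySem.Set.mem_add _ _ _).mpr (Or.inl this.1), ?_⟩
              rintro (hx | rfl)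
              · exact this.2 hx
              · exact hnmem this.1)
        (by dsimp only
            intro d hdi hdF
            have hdF2 : d ∉ (s.2 : List (Int × Int)) :=
              fun hx => hdF ((PySem.Set.mem_add _ _ _).mpr (Or.inl hx))
            have hdn : d ≠ (x + o.1, y + o.2) :=
              fun hx => hdF ((PySem.Set.mem_add _ _ _).mpr (Or.inr hx))
            rcases h8 d hdi hdF2 with hL | ⟨o', ho', hz', hd'⟩
            · exact Or.inl hL
            · rcases List.mem_cons.mp ho' with rfl | ho'
              · exact absurd hd' hdn
              · exact Or.inr ⟨o', ho', hz', hd'⟩)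
      refine ⟨c1, c2, c3, c4, c5, c6, c7, c8, ?_, ?_⟩
      · have hlF : (PySem.Set.add s.2 (x + o.1, y + o.2) : List (Int × Int)).length
            = (s.2 : List (Int × Int)).length + 1 := by
          rw [hadd, List.length_append, List.length_singleton]
        simp only [List.length_append, List.length_singleton] at c9
        omega
      · intro e he
        exact c10 e ((PySem.Set.mem_add _ _ _).mpr (Or.inl he))
    · have hstep : pvBStep g0 w h x y s o = s := by
        unfold pvBStep
        rw [if_neg hcond]
      rw [hstep]
      apply ih s h1 h2 h3 h4 h5 h6 h7
      intro d hdi hdF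
      rcases h8 d hdi hdF with hL | ⟨o', ho', hz', hd'⟩
      · exact Or.inl hL
      rcases List.mem_cons.mp ho' with rfl | ho'
      · subst hd'
        by_cases hlit : pvLit g0 s.2 (x + o'.1) (y + o'.2) = true
        · exfalso
          apply hcond
          have hnc : PySem.Set.contains s.2 (x + o'.1, y + o'.2) = false := by
            rw [← Bool.not_eq_true]
            intro hx
            exact hdF ((PySem.Set.contains_iff _ _).mp hx)
          have hz0 : (o'.1 == (0:Int) && o'.2 == (0:Int)) = false := by
            simp only [Bool.and_eq_false_iff, beq_eq_false_iff_ne, ne_eq]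
            tauto
          obtain ⟨hd1, hd2, hd3, hd4⟩ := hdi
          dsimp only at hd1 hd2 hd3 hd4
          simp [hz0, hnc, hlit, hd1, hd2, hd3, hd4, hdF]
        · left
          have hnp : ¬ pvP g0 s.2 (x + o'.1, y + o'.2) :=
            fun hx => hlit ((pvLit_iff _ _ _ _).mpr hx)
          intro hP
          apply hnp
          unfold pvP at hP ⊢
          have hsub : ∀ a ∈ pr ++ [(x, y)], a ∈ (s.2 : List (Int × Int)) := by
            intro a ha
            rcases List.mem_append.mp ha with ha | ha
            · exact hpr a ha
            · simp only [List.mem_singleton] at ha; exact ha ▸ h5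
          have := pvNear_mono hsub (x + o'.1, y + o'.2).1 (x + o'.1, y + o'.2).2
          omega
      · exact Or.inr ⟨o', ho', hz', hd'⟩

theorem loopB_master {g0 : List (List Int)} {w h : Int} :
    ∀ (fuel : Nat) (st : List (Int × Int)) (F : PySem.Set (Int × Int)),
    pvInvB g0 w h st F →
    st.length + 2 * (w.toNat * h.toNat - F.length) < fuel →
    (pvLoopB g0 w h fuel st F).Nodup ∧
    (∀ c ∈ pvLoopB g0 w h fuel st F, pvInterior w h c) ∧
    (∀ c, pvInterior w h c → c ∉ pvLoopB g0 w h fuel st F →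
      ¬ pvP g0 (pvLoopB g0 w h fuel st F) c) ∧
    (∀ c ∈ F, c ∈ pvLoopB g0 w h fuel st F) := by
  intro fuel
  induction fuel with
  | zero => intro st F _ hfuel; exact absurd hfuel (by omega)
  | succ fuel ih =>
    intro st F hI hfuel
    obtain ⟨hFnd, hstnd, hFint, hstF, hcl⟩ := hI
    rcases List.eq_nil_or_concat st with rfl | ⟨rest, ⟨x, y⟩, rfl⟩
    · have hres : pvLoopB g0 w h (fuel + 1) [] F = F := by
        simp [pvLoopB, PySem.List.pop?]
      rw [hres]
      refine ⟨hFnd, hFint, ?_, fun c hc => hc⟩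
      intro c hci hcF hP
      apply hcl c hci hcF
      unfold pvP at hP ⊢
      rwa [pvNear_congr (F := (F.filter fun a => decide (a ∉ ([] : List (Int × Int)))))
        (F' := (F : List (Int × Int))) (by simp [List.mem_filter])]
    · rw [List.concat_eq_append] at hstnd hstF hcl hfuel
      rw [List.concat_eq_append, pvLoopB_succ]
      have hnodupapp := List.nodup_append.mp hstnd
      have hxyF : (x, y) ∈ F := hstF _ (List.mem_append_right _ List.mem_cons_self)
      have hxynr : (x, y) ∉ rest :=
        (List.nodup_cons.mp (List.nodup_append_comm.mp hstnd)).1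
      obtain ⟨c1, c2, c3, c4, c5, c6, c7, c8, c9, c10⟩ :=
        innerB (g0 := g0) (w := w) (h := h) (x := x) (y := y)
          (pr := F.filter fun a => decide (a ∉ rest ++ [(x, y)])) pvDirs (rest, F)
          hFnd hnodupapp.1 (fun e he => hstF e (List.mem_append_left _ he)) hFint hxyF hxynr
          (by intro a
              simp only [List.mem_filter, decide_eq_true_eq]
              constructor
              · rintro ⟨haF, har⟩
                by_cases hax : a = (x, y)
                · exact Or.inr hax
                · refine Or.inl ⟨haF, ?_⟩
                  simp only [List.mem_append, List.mem_singleton]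
                  rintro (hx | hx)
                  · exact har hx
                  · exact hax hx
              · rintro (⟨haF, har⟩ | rfl)
                · exact ⟨haF, fun hx => har (List.mem_append_left _ hx)⟩
                · exact ⟨hxyF, hxynr⟩)
          (by intro d hdi hdF
              have hbase := hcl d hdi hdF
              by_cases hadj : ∃ o ∈ pvDirs, ¬(o.1 = 0 ∧ o.2 = 0) ∧ d = (x + o.1, y + o.2)
              · exact Or.inr hadj
              · left
                intro hP
                apply hbase
                unfold pvP at hP ⊢
                have hnotc : (x, y) ∉ F.filter fun a => decide (a ∉ rest ++ [(x, y)]) := by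
                  simp [List.mem_filter]
                rw [pvNear_append_singleton hnotc] at hP
                have hz : pvNear [(x, y)] d.1 d.2 = 0 := by
                  rw [pvNear_singleton]
                  split
                  · next hcnd =>
                    exfalso
                    apply hadj
                    refine ⟨(d.1 - x, d.2 - y), ?_, ?_, ?_⟩
                    · rw [mem_pvDirs]
                      dsimp only
                      omega
                    · dsimp only
                      obtain ⟨hne, -⟩ := hcnd
                      intro ⟨e1, e2⟩
                      exact hne (by
                        obtain ⟨dx', dy'⟩ := d
                        simp only at e1 e2 ⊢
                        exact Prod.ext_iff.mpr ⟨by omega, by omega⟩)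
                    · obtain ⟨dx', dy'⟩ := d
                      simp only
                      exact Prod.ext_iff.mpr ⟨by omega, by omega⟩
                  · rfl
                omega)
      set s' := pvDirs.foldl (pvBStep g0 w h x y) (rest, F) with hs'
      have hlen1 : (s'.2 : List (Int × Int)).length ≤ w.toNat * h.toNat :=
        length_le_cells c1 c4
      have hlen2 : (F : List (Int × Int)).length ≤ (s'.2 : List (Int × Int)).length :=
        (hFnd.subperm c10).length_le
      have hclB : ∀ d, pvInterior w h d → d ∉ (s'.2 : List (Int × Int)) →
          ¬ pvP g0 (s'.2.filter fun a => decide (a ∉ s'.1)) d := by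
        intro d hdi hdF
        have := c8 d hdi hdF
        intro hP
        apply this
        unfold pvP at hP ⊢
        rwa [pvNear_congr (F := (s'.2.filter fun a => decide (a ∉ s'.1)))
          (F' := (F.filter fun a => decide (a ∉ rest ++ [(x, y)])) ++ [(x, y)])
          (by intro a
              simp only [List.mem_filter, decide_eq_true_eq, List.mem_append, List.mem_singleton]
              constructor
              · rintro ⟨haF, har⟩
                rcases (c7 a).mp ⟨haF, har⟩ with hh | hh
                · exact Or.inl (by simpa [List.mem_filter] using hh)
                · exact Or.inr hh
              · intro hh
                exact (c7 a).mpr (by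
                  rcases hh with hh | hh
                  · exact Or.inl (by simpa [List.mem_filter] using hh)
                  · exact Or.inr hh))] at hP
      obtain ⟨d1, d2, d3, d4⟩ := ih s'.1 s'.2 ⟨c1, c2, c4, c3, hclB⟩
        (by dsimp only at c9
            simp only [List.length_append, List.length_singleton] at hfuel c9 ⊢
            omega)
      exact ⟨d1, d2, d3, fun c hc => d4 c (c10 c hc)⟩

-- degenerate grids (no interior cells): both programs flash nothing and return 0
theorem step_degenerate (grid : List (List Int))
    (hdeg : (((PySem.List.pyGet? grid 0).getD []).length : Int) - 2 ≤ 0 ∨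
      (grid.length : Int) - 2 ≤ 0) :
    step grid = step_alt grid := by
  set W : Int := (((PySem.List.pyGet? grid 0).getD []).length : Int) - 2 with hWdef
  set H : Int := (grid.length : Int) - 2 with hHdef
  have hfz : W.toNat * H.toNat = 0 := by
    have : W.toNat = 0 ∨ H.toNat = 0 := by omega
    rcases this with hh | hh <;> simp [hh]
  have hcells : pvCells W H = [] := by
    apply List.eq_nil_iff_forall_not_mem.mpr
    intro c hc
    obtain ⟨h1, h2, h3, h4⟩ := mem_pvCells.mp hc
    omega
  have hcf : ∀ g, check_flash g W H = [] := by
    intro g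
    rw [check_flash_eq, hcells]
    rfl
  have hst0 : (PySem.List.pyRange 1 (H + 1) 1).flatMap (fun y =>
      ((PySem.List.pyRange 1 (W + 1) 1).filter (fun x => pvLit grid [] x y)).map
        (fun x => (x, y))) = [] := by
    apply List.eq_nil_iff_forall_not_mem.mpr
    intro c hc
    simp only [List.mem_flatMap, List.mem_map, List.mem_filter,
      PySem.List.mem_pyRange_one] at hc
    obtain ⟨y, hy, x, ⟨⟨hx, -⟩, -⟩⟩ := hc
    omega
  rw [step, step_alt]
  simp only [← hWdef, ← hHdef, hst0, hfz]
  have hA : pvLoopA W H (0 + 1) (increase_grid grid W H) [] =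
      (increase_grid grid W H, []) := by
    simp [pvLoopA, hcf]
  have hB : pvLoopB grid W H (3 * 0 + 1) [] (PySem.Set.ofList []) = [] := by
    simp [pvLoopB, PySem.List.pop?]
  rw [hA, hB]

-- ===== VERDICT (by name: the statement is the Claim_ definition above) =====
theorem step_spec : Claim_equal_step := by
  intro grid hdom hpre
  unfold Spec_step
  obtain ⟨hne, hpre2⟩ := hpre
  rcases grid with - | ⟨r0, gr⟩
  · exact absurd rfl hne
  set grid := r0 :: gr with hgrid
  have hW : ((PySem.List.pyGet? grid 0).getD []) = r0 := by
    rw [hgrid, PySem.List.pyGet?_zero_cons]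
    rfl
  set W : Int := (((PySem.List.pyGet? grid 0).getD []).length : Int) - 2 with hWdef
  set H : Int := (grid.length : Int) - 2 with hHdef
  by_cases hdeg : W ≤ 0 ∨ H ≤ 0
  · exact step_degenerate grid (by rw [hWdef, hHdef] at hdeg; exact hdeg)
  have hrows : ∀ row ∈ grid, (grid.headD []).length ≤ row.length := by
    rcases hpre2 with hh | hh | hh
    · exfalso
      apply hdeg
      left
      rw [hWdef, hW]
      simp only [hgrid, List.headD_cons] at hh
      have : r0.length ≤ 2 := by simpa [hgrid, hW] using hh
      omega
    · exfalso
      apply hdeg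
      right
      rw [hHdef]
      omega
    · exact hh
  have hd : pvDims grid W H := by
    constructor
    · intro row hrow
      have := hrows row hrow
      rw [hWdef, hW]
      simp only [hgrid, List.headD_cons] at this
      omega
    · rw [hHdef]; ring
  -- A's run
  have hInvA : pvInvA grid W H (increase_grid grid W H) [] := by
    refine ⟨increase_shape grid W H, List.nodup_nil, fun c hc => absurd hc (List.not_mem_nil),
      ?_, trivial⟩
    intro c hci _
    rw [increase_val hd hci, pvNear_nil, ← pvValA_eq_pvGetB]
    ring
  have hScells : pvClosed grid W H (pvCells W H) := fun c hci _ => mem_pvCells.mpr hci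
  obtain ⟨a1, a2, -, a4, -⟩ := loopA_master hd hScells (W.toNat * H.toNat + 1)
    (increase_grid grid W H) [] hInvA (fun c hc => absurd hc (List.not_mem_nil)) (by omega)
  -- B's initial stack
  set st0 := (PySem.List.pyRange 1 (H + 1) 1).flatMap (fun y =>
    ((PySem.List.pyRange 1 (W + 1) 1).filter (fun x => pvLit grid [] x y)).map
      (fun x => (x, y))) with hst0
  have hmem0 : ∀ a : Int × Int, a ∈ st0 ↔ pvInterior W H a ∧ pvLit grid [] a.1 a.2 = true := by
    intro a
    obtain ⟨ax, ay⟩ := a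
    rw [hst0]
    simp only [List.mem_flatMap, List.mem_map, List.mem_filter, PySem.List.mem_pyRange_one,
      Prod.mk.injEq]
    constructor
    · rintro ⟨y, hy, x, ⟨⟨hx, hlx⟩, rfl, rfl⟩⟩
      exact ⟨⟨by omega, by omega, by omega, by omega⟩, hlx⟩
    · rintro ⟨⟨h1, h2, h3, h4⟩, hl⟩
      exact ⟨ay, by omega, ax, ⟨⟨by omega, hl⟩, rfl, rfl⟩⟩
  have hnd0 : st0.Nodup := by
    rw [hst0]
    refine nodup_flatMap_pairs _ _ (fun y x => (x, y)) (fun a b a' b' hp => ?_)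
      (PySem.List.nodup_pyRange_one _ _)
      (fun y => (PySem.List.nodup_pyRange_one _ _).filter _)
    exact ⟨(Prod.ext_iff.mp hp).2, (Prod.ext_iff.mp hp).1⟩
  have hint0 : ∀ c ∈ st0, pvInterior W H c := fun c hc => ((hmem0 c).mp hc).1
  have hlen0 : st0.length ≤ W.toNat * H.toNat := length_le_cells hnd0 hint0
  have hF0 : PySem.Set.ofList st0 = st0 := PySem.Set.ofList_eq_self_of_nodup _ hnd0
  have hInvB : pvInvB grid W H st0 st0 := by
    refine ⟨hnd0, hnd0, hint0, fun c hc => hc, ?_⟩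
    intro c hci hcF hP
    have hfilt : st0.filter (fun a => decide (a ∉ st0)) = [] :=
      List.filter_eq_nil_iff.mpr (fun a ha => by simpa using ha)
    rw [hfilt] at hP
    apply hcF
    rw [hmem0 c]
    refine ⟨hci, ?_⟩
    rw [pvLit_iff]
    exact hP
  obtain ⟨b1, b2, b3, b4⟩ := loopB_master (3 * (W.toNat * H.toNat) + 1) st0 st0 hInvB (by omega)
  -- the two flash sets coincide
  set RA := (pvLoopA W H (W.toNat * H.toNat + 1) (increase_grid grid W H) []).2 with hRA
  set RB := pvLoopB grid W H (3 * (W.toNat * H.toNat) + 1) st0 st0 with hRB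
  have hclRB : pvClosed grid W H RB := by
    intro c hci hP
    by_cases hc : c ∈ RB
    · exact hc
    · exact absurd hP (b3 c hci hc)
  have hclRA : pvClosed grid W H RA := by
    intro c hci hP
    by_cases hc : c ∈ RA
    · exact hc
    · exact absurd hP (a4 c hci hc)
  obtain ⟨-, -, hAB, -, -⟩ := loopA_master hd hclRB (W.toNat * H.toNat + 1)
    (increase_grid grid W H) [] hInvA (fun c hc => absurd hc (List.not_mem_nil)) (by omega)
  have hBA : ∀ c ∈ RB, c ∈ RA := by
    apply loopB_subset hclRA
    intro c hc
    apply hclRA c (hint0 c hc)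
    have hl := ((hmem0 c).mp hc).2
    rw [pvLit_iff] at hl
    unfold pvP at hl ⊢
    have hmono := pvNear_mono (F := ([] : List (Int × Int))) (F' := RA)
      (fun a ha => absurd ha (List.not_mem_nil)) c.1 c.2
    dsimp only at hl ⊢
    omega
  have hlen : RA.length = RB.length :=
    Nat.le_antisymm ((a1.subperm hAB).length_le) ((b1.subperm hBA).length_le)
  -- both programs return the size of that set
  show step grid = step_alt grid
  rw [step, step_alt]
  simp only [← hWdef, ← hHdef, ← hst0, hF0, ← hRA, ← hRB]
  exact_mod_cast hlen
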